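-- pv_equiv track=rewrite | github.com/Ibsham7/Third-Semester | Information security/lab#4/task1.py | desPlaintextBlock
-- ===== SOURCE A (Python) =====
-- def desPlaintextBlock(plaintext):
--     binary_string = ""
--
--     for char in plaintext:
--         # Get the ASCII value of the character and convert to 8-bit binary
--         ascii_value = ord(char)
--         binary_char = format(ascii_value, '08b')  # '08b' means 8-digit binary with leading zeros
--         binary_string += binary_char
--
--
--
--     # Step 2: Split the binary string into 64-bit blocks
--     block_size = 64  # DES uses 64-bit blocks
--     blocks = []
--
--     # Process the binary string in chunks of 64 bits
--     for i in range(0, len(binary_string), block_size):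
--         # Get the next 64-bit chunk
--         block = binary_string[i:i + block_size]
--
--         # Step 3: If this is the last block and it's shorter than 64 bits, pad with zeros
--         if len(block) < block_size:
--             # Calculate how many zeros we need to add
--             padding_needed = block_size - len(block)
--             # Add the required number of zeros at the end
--             block += '0' * padding_needed
--
--         # Add this completed block to our list
--         blocks.append(block)
--
--     # Step 4: Return the list of 64-bit blocks
--     return blocks
-- ===== SOURCE B (Python) =====
-- def desPlaintextBlock(plaintext):
--     # One pass over 8-character groups (8 chars = exactly 64 bits); no
--     # intermediate full binary string and no re-slicing of it.
--     blocks = []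
--     for i in range(0, len(plaintext), 8):
--         block = ''.join(format(ord(c), '08b') for c in plaintext[i:i + 8])
--         blocks.append(block + '0' * (64 - len(block)))
--     return blocks
-- ===== Notes on version B (the rewrite author's own statement) =====
-- stated objective: alternative
-- what changed: B drops A's intermediate full binary string and its index-range re-slicing: it peels 8 characters at a time off the front of the plaintext (8 chars = exactly 64 bits), encodes each group directly into one block and pads that block, in a single while loop.
import Mathlib
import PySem

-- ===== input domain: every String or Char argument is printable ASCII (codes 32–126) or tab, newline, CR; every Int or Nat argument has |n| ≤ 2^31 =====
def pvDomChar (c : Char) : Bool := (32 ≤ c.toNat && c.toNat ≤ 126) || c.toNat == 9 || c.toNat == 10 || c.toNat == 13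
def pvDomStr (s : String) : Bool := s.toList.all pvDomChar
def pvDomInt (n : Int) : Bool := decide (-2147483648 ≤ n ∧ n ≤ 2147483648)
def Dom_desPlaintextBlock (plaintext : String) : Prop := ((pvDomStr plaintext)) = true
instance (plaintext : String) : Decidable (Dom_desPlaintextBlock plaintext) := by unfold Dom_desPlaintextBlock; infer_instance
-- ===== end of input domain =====

-- B replaces A's "build one big binary string, then re-slice it into 64-bit pieces"
-- with a single pass over 8-character groups of the plaintext (8 chars = exactly
-- 64 bits), emitting each padded block directly (objective: alternative).


-- ===== PORT A =====
-- format(n, '08b'): binary digits left-padded with '0' to width 8 (exact for n ≥ 0)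
def pvFmt08 (n : Nat) : List Char :=
  let b := PySem.Int.toBinChars (n : Int)
  List.replicate (8 - b.length) '0' ++ b

def desPlaintextBlock (plaintext : String) : List String :=
  -- binary_string built by appending format(ord(char), '08b') per character
  let binaryString : List Char :=
    plaintext.toList.foldl (fun acc c => acc ++ pvFmt08 c.toNat) []
  -- for i in range(0, len(binary_string), 64): slice, pad if short, append
  (PySem.List.pyRange 0 (PySem.List.len binaryString) 64).foldl
    (fun blocks i =>
      let block := PySem.List.slice binaryString (some i) (some (i + 64))
      let block :=
        if block.length < 64 then block ++ List.replicate (64 - block.length) '0'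
        else block
      blocks ++ [String.ofList block]) []

-- ===== PORT B =====
-- for i in range(0, len(plaintext), 8): encode plaintext[i:i+8], pad to 64, append
def desPlaintextBlock_alt (plaintext : String) : List String :=
  let cs := plaintext.toList
  (PySem.List.pyRange 0 (PySem.List.len cs) 8).foldl
    (fun blocks i =>
      let block := (PySem.List.slice cs (some i) (some (i + 8))).flatMap
        (fun c => pvFmt08 c.toNat)
      blocks ++ [String.ofList (block ++ List.replicate (64 - block.length) '0')]) []

-- ===== PRECONDITION & SPEC =====
def Spec_desPlaintextBlock (plaintext : String) (out : List String) : Prop := out = desPlaintextBlock_alt plaintext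
instance (plaintext : String) (out : List String) : Decidable (Spec_desPlaintextBlock plaintext out) := by unfold Spec_desPlaintextBlock; infer_instance

-- ===== CLAIM (what is proved, stated in full; the proofs are below) =====
def Claim_equal_desPlaintextBlock : Prop := ∀ (plaintext : String), Dom_desPlaintextBlock plaintext → Spec_desPlaintextBlock plaintext (desPlaintextBlock plaintext)

-- ===== LEMMAS AND PROOFS =====

-- proof-side abbreviations: A's pad-then-make-string step, B's encode-and-pad step,
-- and the byte encoder
def pvMk (block : List Char) : String :=
  String.ofList (if block.length < 64 then block ++ List.replicate (64 - block.length) '0' else block)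

def pvEnc (c : Char) : List Char := pvFmt08 c.toNat

lemma pvEnc_eq : (fun c : Char => pvFmt08 c.toNat) = pvEnc := rfl

def pvMkB (g : List Char) : String :=
  String.ofList (g.flatMap pvEnc ++ List.replicate (64 - (g.flatMap pvEnc).length) '0')

-- each domain character encodes to exactly 8 bits
lemma pvFmt08_len : ∀ n : Nat, n < 128 → (pvFmt08 n).length = 8 := by decide

lemma pvEnc_flatMap_len (l : List Char) (h : ∀ c ∈ l, c.toNat < 128) :
    (l.flatMap pvEnc).length = 8 * l.length := by
  induction l with
  | nil => simp
  | cons c t ih =>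
    simp only [List.flatMap_cons, List.length_append, List.length_cons]
    rw [pvEnc, pvFmt08_len _ (h c (by simp)), ih (fun x hx => h x (List.mem_cons_of_mem _ hx))]
    ring

-- A's conditional padding equals B's unconditional padding when the block fits
lemma pvMk_eq_pad (bs : List Char) (h : bs.length ≤ 64) :
    pvMk bs = String.ofList (bs ++ List.replicate (64 - bs.length) '0') := by
  unfold pvMk
  split_ifs with h'
  · rfl
  · have : bs.length = 64 := by omega
    simp [this]

-- rewrite A's index loop into a map over block numbers
lemma pvA_norm (bs : List Char) :
    (PySem.List.pyRange 0 (PySem.List.len bs) 64).foldl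
      (fun blocks i => blocks ++ [pvMk (PySem.List.slice bs (some i) (some (i + 64)))]) []
    = (List.range ((bs.length + 63) / 64)).map
        (fun k => pvMk (List.take 64 (List.drop (64 * k) bs))) := by
  rw [PySem.List.foldl_append_singleton_eq_map
        (f := fun i => pvMk (PySem.List.slice bs (some i) (some (i + 64))))]
  rw [List.nil_append, PySem.List.pyRange_of_pos 0 _ (by norm_num)]
  simp only [PySem.List.len_eq]
  have hm : (if (0:Int) < (bs.length:Int)
      then (((bs.length:Int) - 0 + 64 - 1) / 64).toNat else 0) = (bs.length + 63) / 64 := by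
    split_ifs with h <;> omega
  rw [hm, List.map_map]
  refine List.map_congr_left (fun k _ => ?_)
  simp only [Function.comp]
  have h1 : (0 : Int) + 64 * (k : Int) = ((64 * k : Nat) : Int) := by push_cast; ring
  have h2 : ((64 * k : Nat) : Int) + 64 = ((64 * k : Nat) : Int) + ((64 : Nat) : Int) := by norm_num
  rw [h1, h2, PySem.List.slice_natCast_add]

-- rewrite B's index loop into a map over group numbers
lemma pvB_norm (cs : List Char) :
    (PySem.List.pyRange 0 (PySem.List.len cs) 8).foldl
      (fun blocks i => blocks ++ [pvMkB (PySem.List.slice cs (some i) (some (i + 8)))]) []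
    = (List.range ((cs.length + 7) / 8)).map
        (fun k => pvMkB (List.take 8 (List.drop (8 * k) cs))) := by
  rw [PySem.List.foldl_append_singleton_eq_map
        (f := fun i => pvMkB (PySem.List.slice cs (some i) (some (i + 8))))]
  rw [List.nil_append, PySem.List.pyRange_of_pos 0 _ (by norm_num)]
  simp only [PySem.List.len_eq]
  have hm : (if (0:Int) < (cs.length:Int)
      then (((cs.length:Int) - 0 + 8 - 1) / 8).toNat else 0) = (cs.length + 7) / 8 := by
    split_ifs with h <;> omega
  rw [hm, List.map_map]
  refine List.map_congr_left (fun k _ => ?_)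
  simp only [Function.comp]
  have h1 : (0 : Int) + 8 * (k : Int) = ((8 * k : Nat) : Int) := by push_cast; ring
  have h2 : ((8 * k : Nat) : Int) + 8 = ((8 * k : Nat) : Int) + ((8 : Nat) : Int) := by norm_num
  rw [h1, h2, PySem.List.slice_natCast_add]

-- the first 64 bits of the encoding are the encoding of the first 8 characters
lemma pvTake64 (cs : List Char) (hdom : ∀ c ∈ cs, c.toNat < 128) :
    List.take 64 (cs.flatMap pvEnc) = (cs.take 8).flatMap pvEnc := by
  have hsplit : cs.flatMap pvEnc = (cs.take 8).flatMap pvEnc ++ (cs.drop 8).flatMap pvEnc := by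
    conv_lhs => rw [← List.take_append_drop 8 cs]
    rw [List.flatMap_append]
  have hchunk : ((cs.take 8).flatMap pvEnc).length = 8 * min 8 cs.length := by
    rw [pvEnc_flatMap_len _ (fun x hx => hdom x (List.take_subset _ _ hx)), List.length_take]
  rw [hsplit]
  by_cases h8 : cs.length ≤ 8
  · rw [List.drop_eq_nil_of_le h8, List.flatMap_nil, List.append_nil,
        List.take_of_length_le (by omega)]
  · exact List.take_left' (by omega)

-- dropping 64 bits of the encoding is dropping 8 characters
lemma pvDrop64 (cs : List Char) (hdom : ∀ c ∈ cs, c.toNat < 128) :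
    List.drop 64 (cs.flatMap pvEnc) = (cs.drop 8).flatMap pvEnc := by
  have hsplit : cs.flatMap pvEnc = (cs.take 8).flatMap pvEnc ++ (cs.drop 8).flatMap pvEnc := by
    conv_lhs => rw [← List.take_append_drop 8 cs]
    rw [List.flatMap_append]
  have hchunk : ((cs.take 8).flatMap pvEnc).length = 8 * min 8 cs.length := by
    rw [pvEnc_flatMap_len _ (fun x hx => hdom x (List.take_subset _ _ hx)), List.length_take]
  rw [hsplit]
  by_cases h8 : cs.length ≤ 8
  · rw [List.drop_eq_nil_of_le h8, List.flatMap_nil, List.append_nil]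
    exact List.drop_eq_nil_of_le (by omega)
  · have h64 : ((cs.take 8).flatMap pvEnc).length = 64 := by omega
    rw [show (64:Nat) = ((cs.take 8).flatMap pvEnc).length from h64.symm, List.drop_left]

-- block k of the encoding is the encoding of character group k
lemma pvChunk (k : Nat) : ∀ (cs : List Char), (∀ c ∈ cs, c.toNat < 128) →
    List.take 64 (List.drop (64 * k) (cs.flatMap pvEnc))
      = (List.take 8 (List.drop (8 * k) cs)).flatMap pvEnc := by
  induction k with
  | zero => intro cs hdom; simpa using pvTake64 cs hdom
  | succ k ih =>
    intro cs hdom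
    have h1 : 64 * (k + 1) = 64 + 64 * k := by ring
    have h2 : 8 * (k + 1) = 8 + 8 * k := by ring
    rw [h1, h2, ← List.drop_drop, ← List.drop_drop, pvDrop64 cs hdom]
    exact ih _ (fun x hx => hdom x (List.drop_subset _ _ hx))

-- ===== VERDICT (by name: the statement is the Claim_ definition above) =====
theorem desPlaintextBlock_spec : Claim_equal_desPlaintextBlock := by
  intro plaintext hdom
  simp only [Spec_desPlaintextBlock, desPlaintextBlock, desPlaintextBlock_alt]
  have hchars : ∀ c ∈ plaintext.toList, c.toNat < 128 := by
    intro c hc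
    have := List.all_eq_true.mp hdom c hc
    unfold pvDomChar at this
    simp only [Bool.or_eq_true, Bool.and_eq_true, decide_eq_true_eq, beq_iff_eq] at this
    omega
  have hbin : plaintext.toList.foldl (fun acc c => acc ++ pvFmt08 c.toNat) []
      = plaintext.toList.flatMap pvEnc := by
    rw [PySem.List.foldl_append_eq_flatMap, List.nil_append]; rfl
  have hA := pvA_norm (plaintext.toList.flatMap pvEnc)
  simp only [pvMk] at hA
  have hB := pvB_norm plaintext.toList
  simp only [pvMkB] at hB
  rw [hbin, hA]
  simp only [pvEnc_eq]
  rw [hB, pvEnc_flatMap_len _ hchars]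
  have hcnt : (8 * plaintext.toList.length + 63) / 64 = (plaintext.toList.length + 7) / 8 := by
    omega
  rw [hcnt]
  refine List.map_congr_left (fun k _ => ?_)
  have hc := pvChunk k plaintext.toList hchars
  have hle : ((List.take 8 (List.drop (8 * k) plaintext.toList)).flatMap pvEnc).length ≤ 64 := by
    rw [pvEnc_flatMap_len _ (fun x hx =>
      hchars x (List.drop_subset _ _ (List.take_subset _ _ hx))), List.length_take]
    omega
  have := pvMk_eq_pad _ hle
  simp only [pvMk] at this
  rw [hc, this]
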